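-- pv_equiv track=rewrite | github.com/MateoCentis/Guias_Imagenes | TP3_FILTRADO_ESPACIAL/utils.py | contar_ceros_y_no_ceros_seguidos
-- ===== SOURCE A (Python) =====
-- def contar_ceros_y_no_ceros_seguidos(arreglo):
--     cantidad_ceros_seguidos = 0
--     cantidad_no_ceros_seguidos = 0
--     ceros_actuales = 0
--     no_ceros_actuales = 0
--
--     for elemento in arreglo:
--         if elemento == 0:
--             ceros_actuales += 1
--             cantidad_no_ceros_seguidos = max(cantidad_no_ceros_seguidos, no_ceros_actuales)
--             no_ceros_actuales = 0
--         else: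
--             no_ceros_actuales += 1
--             cantidad_ceros_seguidos = max(cantidad_ceros_seguidos, ceros_actuales)
--             ceros_actuales = 0
--
--     cantidad_ceros_seguidos = max(cantidad_ceros_seguidos, ceros_actuales)
--     cantidad_no_ceros_seguidos = max(cantidad_no_ceros_seguidos, no_ceros_actuales)
--
--     return cantidad_ceros_seguidos, cantidad_no_ceros_seguidos
-- ===== SOURCE B (Python) =====
-- def contar_ceros_y_no_ceros_seguidos(arreglo):
--     # Run-at-a-time scan: find each maximal run of equal zero-ness with an
--     # inner scan, then fold its length into the right maximum.
--     zeros = 0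
--     nonzeros = 0
--     i = 0
--     n = len(arreglo)
--     while i < n:
--         iszero = (arreglo[i] == 0)
--         j = i + 1
--         while j < n and (arreglo[j] == 0) == iszero:
--             j += 1
--         if iszero:
--             zeros = max(zeros, j - i)
--         else:
--             nonzeros = max(nonzeros, j - i)
--         i = j
--     return zeros, nonzeros
-- ===== Notes on version B (the rewrite author's own statement) =====
-- stated objective: alternative
-- what changed: Replaces A's per-element loop with four running counters (current/best zero and nonzero streaks) by a run-at-a-time scan: an inner scan finds each maximal run of equal zero-ness and its length is folded directly into the corresponding maximum.
import Mathlib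
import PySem

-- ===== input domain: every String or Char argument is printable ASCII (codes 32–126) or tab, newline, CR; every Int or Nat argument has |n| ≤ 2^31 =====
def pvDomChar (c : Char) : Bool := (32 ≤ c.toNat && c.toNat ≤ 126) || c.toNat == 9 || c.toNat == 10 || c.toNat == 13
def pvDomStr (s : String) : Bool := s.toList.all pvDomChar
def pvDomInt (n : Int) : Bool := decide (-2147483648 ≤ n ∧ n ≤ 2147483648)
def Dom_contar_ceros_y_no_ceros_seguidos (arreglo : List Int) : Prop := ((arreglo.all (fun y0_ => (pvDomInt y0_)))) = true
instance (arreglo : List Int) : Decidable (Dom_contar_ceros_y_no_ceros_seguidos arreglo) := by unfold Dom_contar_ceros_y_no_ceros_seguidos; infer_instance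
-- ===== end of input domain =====

-- B replaces A's per-element four-counter loop by a run-at-a-time scan (alternative decomposition, same cost).

-- ===== PORT A =====
-- loop body of A: state = (cantidad_ceros, cantidad_no_ceros, ceros_actuales, no_ceros_actuales)
def pvBodyA (st : Int × Int × Int × Int) (elemento : Int) : Int × Int × Int × Int :=
  let (cz, cnz, za, nza) := st
  if elemento == 0 then (cz, max cnz nza, za + 1, 0)
  else (max cz za, cnz, 0, nza + 1)

def contar_ceros_y_no_ceros_seguidos (arreglo : List Int) : Int × Int :=
  let s := arreglo.foldl pvBodyA (0, 0, 0, 0)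
  (max s.1 s.2.2.1, max s.2.1 s.2.2.2)

-- ===== PORT B =====
-- outer while-loop of B: each iteration consumes one maximal run (the inner
-- scan `while j < n and (arreglo[j] == 0) == iszero` is the takeWhile/dropWhile
-- split of the suffix); j - i = 1 + run.length
def pvAltLoop (l : List Int) (zeros nonzeros : Int) : Int × Int :=
  match l with
  | [] => (zeros, nonzeros)
  | x :: xs =>
    let iszero := (x == 0)
    let run := xs.takeWhile (fun y => (y == 0) == iszero)
    let rest := xs.dropWhile (fun y => (y == 0) == iszero)
    if iszero then pvAltLoop rest (max zeros (1 + (run.length : Int))) nonzeros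
    else pvAltLoop rest zeros (max nonzeros (1 + (run.length : Int)))
termination_by l.length
decreasing_by
  all_goals exact Nat.lt_succ_of_le (List.length_dropWhile_le _ _)

def contar_ceros_y_no_ceros_seguidos_alt (arreglo : List Int) : Int × Int :=
  pvAltLoop arreglo 0 0

-- ===== PRECONDITION & SPEC =====
def Spec_contar_ceros_y_no_ceros_seguidos (arreglo : List Int) (out : Int × Int) : Prop := out = contar_ceros_y_no_ceros_seguidos_alt arreglo
instance (arreglo : List Int) (out : Int × Int) : Decidable (Spec_contar_ceros_y_no_ceros_seguidos arreglo out) := by unfold Spec_contar_ceros_y_no_ceros_seguidos; infer_instance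

-- ===== CLAIM (what is proved, stated in full; the proofs are below) =====
def Claim_equal_contar_ceros_y_no_ceros_seguidos : Prop := ∀ (arreglo : List Int), Dom_contar_ceros_y_no_ceros_seguidos arreglo → Spec_contar_ceros_y_no_ceros_seguidos arreglo (contar_ceros_y_no_ceros_seguidos arreglo)

-- ===== LEMMAS AND PROOFS =====

-- A's finishing step
def pvFinish (s : Int × Int × Int × Int) : Int × Int := (max s.1 s.2.2.1, max s.2.1 s.2.2.2)

-- head of dropWhile fails the predicate
theorem pvHead_dropWhile (p : Int → Bool) (l : List Int) (x : Int)
    (h : (l.dropWhile p).head? = some x) : p x = false := by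
  induction l with
  | nil => simp at h
  | cons y ys ih =>
    by_cases hp : p y
    · rw [List.dropWhile_cons_of_pos hp] at h; exact ih h
    · rw [List.dropWhile_cons_of_neg hp] at h
      simp only [List.head?_cons, Option.some.injEq] at h
      subst h; simpa using hp

-- folding A's body over a run of zeros just extends the zero counter
theorem pvFoldA_run_zero (t : List Int) (h : ∀ y ∈ t, y = 0)
    (cz cnz za : Int) (hcnz : 0 ≤ cnz) :
    t.foldl pvBodyA (cz, cnz, za, 0) = (cz, cnz, za + (t.length : Int), 0) := by
  induction t generalizing za with
  | nil => simp
  | cons y ys ih =>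
    have hy : y = 0 := h y (by simp)
    have hys : ∀ z ∈ ys, z = 0 := fun z hz => h z (by simp [hz])
    have hmax : max cnz 0 = cnz := by omega
    simp only [List.foldl_cons, pvBodyA, hy, beq_self_eq_true, if_true, hmax,
      ih hys (za + 1), List.length_cons, Prod.mk.injEq]
    refine ⟨trivial, trivial, by push_cast; ring, trivial⟩

-- folding A's body over a run of nonzeros just extends the nonzero counter
theorem pvFoldA_run_nonzero (t : List Int) (h : ∀ y ∈ t, y ≠ 0)
    (cz cnz nza : Int) (hcz : 0 ≤ cz) :
    t.foldl pvBodyA (cz, cnz, 0, nza) = (cz, cnz, 0, nza + (t.length : Int)) := by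
  induction t generalizing nza with
  | nil => simp
  | cons y ys ih =>
    have hy : y ≠ 0 := h y (by simp)
    have hys : ∀ z ∈ ys, z ≠ 0 := fun z hz => h z (by simp [hz])
    have hmax : max cz 0 = cz := by omega
    simp only [List.foldl_cons, pvBodyA]
    rw [if_neg (by simpa using hy)]
    simp only [hmax, ih hys (nza + 1), List.length_cons, Prod.mk.injEq]
    refine ⟨trivial, trivial, trivial, by push_cast; ring⟩

-- a pending zero-run counter may be committed into cz before a list that does not start with 0
theorem pvShift_zero (r : List Int) (hr : ∀ y, r.head? = some y → y ≠ 0)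
    (cz cnz za : Int) (hcz : 0 ≤ cz) (hza : 0 ≤ za) :
    pvFinish (r.foldl pvBodyA (cz, cnz, za, 0)) =
    pvFinish (r.foldl pvBodyA (max cz za, cnz, 0, 0)) := by
  cases r with
  | nil => simp only [List.foldl_nil, pvFinish]; simp [Prod.ext_iff]; omega
  | cons y ys =>
    have hy : y ≠ 0 := hr y (by simp)
    simp only [List.foldl_cons, pvBodyA]
    rw [if_neg (by simpa using hy), if_neg (by simpa using hy)]
    have h1 : max (max cz za) 0 = max cz za := by omega
    rw [h1]

-- a pending nonzero-run counter may be committed into cnz before a list that does not start nonzero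
theorem pvShift_nonzero (r : List Int) (hr : ∀ y, r.head? = some y → y = 0)
    (cz cnz nza : Int) (hcnz : 0 ≤ cnz) (hnza : 0 ≤ nza) :
    pvFinish (r.foldl pvBodyA (cz, cnz, 0, nza)) =
    pvFinish (r.foldl pvBodyA (cz, max cnz nza, 0, 0)) := by
  cases r with
  | nil => simp only [List.foldl_nil, pvFinish]; simp [Prod.ext_iff]; omega
  | cons y ys =>
    have hy : y = 0 := hr y (by simp)
    have h1 : max (max cnz nza) 0 = max cnz nza := by omega
    simp only [List.foldl_cons, pvBodyA, hy, beq_self_eq_true, if_true, h1]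

-- main bridge: A's fold from a committed state computes B's run-at-a-time loop
theorem pvMainAux : ∀ (n : Nat) (l : List Int), l.length = n → ∀ (cz cnz : Int), 0 ≤ cz → 0 ≤ cnz →
    pvFinish (l.foldl pvBodyA (cz, cnz, 0, 0)) = pvAltLoop l cz cnz := by
  intro n
  induction n using Nat.strong_induction_on with
  | _ n ih =>
    intro l hn cz cnz hcz hcnz
    cases l with
    | nil => simp only [List.foldl_nil, pvFinish, pvAltLoop]; simp [Prod.ext_iff]; omega
    | cons x xs =>
      set p := (fun y : Int => (y == 0) == (x == 0)) with hp
      set t := xs.takeWhile p with htdef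
      set r := xs.dropWhile p with hrdef
      have hsplit : t ++ r = xs := List.takeWhile_append_dropWhile
      have hrlen : r.length < n := by
        have h1 : r.length ≤ xs.length := List.length_dropWhile_le p xs
        simp only [List.length_cons] at hn; omega
      have hRHS : pvAltLoop (x :: xs) cz cnz =
          if x == 0 then pvAltLoop r (max cz (1 + (t.length : Int))) cnz
          else pvAltLoop r cz (max cnz (1 + (t.length : Int))) := by
        rw [pvAltLoop]
      by_cases hx : x = 0
      · have hx0 : ((x == 0) : Bool) = true := by simpa using hx
        have ht0 : ∀ y ∈ t, y = 0 := by
          intro y hy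
          have := List.mem_takeWhile_imp hy
          simpa [hp, hx0] using this
        have hr0 : ∀ y, r.head? = some y → y ≠ 0 := by
          intro y hy
          have := pvHead_dropWhile p xs y hy
          simpa [hp, hx0] using this
        have hstep : pvBodyA (cz, cnz, 0, 0) x = (cz, cnz, 1, 0) := by
          simp [pvBodyA, hx, Prod.ext_iff]; omega
        rw [hRHS, if_pos hx0, List.foldl_cons, hstep, ← hsplit, List.foldl_append,
          pvFoldA_run_zero t ht0 cz cnz 1 hcnz,
          pvShift_zero r hr0 cz cnz (1 + (t.length : Int)) hcz (by positivity),
          ih r.length hrlen r rfl (max cz (1 + (t.length : Int))) cnz (by omega) hcnz]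
      · have hx0 : ((x == 0) : Bool) = false := by simpa using hx
        have ht0 : ∀ y ∈ t, y ≠ 0 := by
          intro y hy
          have := List.mem_takeWhile_imp hy
          simpa [hp, hx0] using this
        have hr0 : ∀ y, r.head? = some y → y = 0 := by
          intro y hy
          have := pvHead_dropWhile p xs y hy
          simpa [hp, hx0] using this
        have hstep : pvBodyA (cz, cnz, 0, 0) x = (cz, cnz, 0, 1) := by
          simp [pvBodyA, hx, Prod.ext_iff]; omega
        rw [hRHS, if_neg (by simp [hx0]), List.foldl_cons, hstep, ← hsplit, List.foldl_append,
          pvFoldA_run_nonzero t ht0 cz cnz 1 hcz,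
          pvShift_nonzero r hr0 cz cnz (1 + (t.length : Int)) hcnz (by positivity),
          ih r.length hrlen r rfl cz (max cnz (1 + (t.length : Int))) hcz (by omega)]

theorem pvMain (l : List Int) (cz cnz : Int) (hcz : 0 ≤ cz) (hcnz : 0 ≤ cnz) :
    pvFinish (l.foldl pvBodyA (cz, cnz, 0, 0)) = pvAltLoop l cz cnz :=
  pvMainAux l.length l rfl cz cnz hcz hcnz

-- ===== VERDICT (by name: the statement is the Claim_ definition above) =====
theorem contar_ceros_y_no_ceros_seguidos_spec : Claim_equal_contar_ceros_y_no_ceros_seguidos := by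
  intro arreglo _
  show _ = _
  have := pvMain arreglo 0 0 le_rfl le_rfl
  simpa [contar_ceros_y_no_ceros_seguidos, contar_ceros_y_no_ceros_seguidos_alt, pvFinish] using this
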